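-- pv_equiv track=rewrite | github.com/Cuenken/advent-of-code-25 | day_2/first.py | get_invalid_ids_from_interval
-- ===== SOURCE A (Python) =====
-- def get_invalid_ids_from_interval(interval: list[int]) -> list[int]:
--     invalid_ids = []
--     for number in interval:
--         # discard odd numbers since they can't have two equal segments
--         if (number_length := len(str_number := str(number))) % 2:
--             continue
--         # determine segment length and compare
--         segment_length = int(number_length / 2)
--         if str_number[:segment_length] == str_number[segment_length:]:
--             invalid_ids.append(number)
--     return invalid_ids
-- ===== SOURCE B (Python) =====
-- def get_invalid_ids_from_interval(interval: list[int]) -> list[int]: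
--     invalid_ids = []
--     for number in interval:
--         # a negative number can never have two equal halves (the '-' sign)
--         if number < 0:
--             continue
--         # count decimal digits arithmetically
--         digits = 1
--         x = number
--         while x >= 10:
--             x //= 10
--             digits += 1
--         if digits % 2:
--             continue
--         # number = hi * 10**k + lo; halves equal  <=>  (10**k + 1) divides number
--         half_power = 10 ** (digits // 2)
--         if number % (half_power + 1) == 0:
--             invalid_ids.append(number)
--     return invalid_ids
-- ===== Notes on version B (the rewrite author's own statement) =====
-- stated objective: alternative
-- what changed: Replaces str() conversion and string-half slicing/comparison with pure arithmetic: a division loop counts decimal digits and equal halves is tested as divisibility by 10**k + 1 (since n = hi*10**k + lo has equal halves iff (10**k+1) | n), with negatives skipped up front.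
import Mathlib
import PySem

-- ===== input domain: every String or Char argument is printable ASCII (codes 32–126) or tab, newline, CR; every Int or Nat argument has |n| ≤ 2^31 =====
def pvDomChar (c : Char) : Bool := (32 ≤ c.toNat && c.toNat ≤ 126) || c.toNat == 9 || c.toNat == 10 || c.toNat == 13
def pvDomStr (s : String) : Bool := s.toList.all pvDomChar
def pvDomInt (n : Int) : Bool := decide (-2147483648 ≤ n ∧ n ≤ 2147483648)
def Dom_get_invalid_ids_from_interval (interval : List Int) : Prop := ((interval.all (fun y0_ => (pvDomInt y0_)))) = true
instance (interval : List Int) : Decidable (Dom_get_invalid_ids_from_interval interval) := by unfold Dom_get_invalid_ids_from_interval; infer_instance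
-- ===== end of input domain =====

-- B replaces str()-half slicing/comparison with a digit-count loop and a divisibility test by 10^k + 1 (alternative arithmetic algorithm, same cost class).

-- ===== PORT A =====
-- str(number) is ported on code points (PySem.Int.toChars, exact); int(number_length / 2)
-- equals number_length // 2 exactly here (number_length ≥ 0 and tiny), ported as floordiv.
def get_invalid_ids_from_interval (interval : List Int) : List Int :=
  interval.foldl (fun invalid_ids number =>
    if PySem.Int.mod (PySem.List.len (PySem.Int.toChars number)) 2 ≠ 0 then
      invalid_ids
    else
      if PySem.List.slice (PySem.Int.toChars number) none
           (some (PySem.Int.floordiv (PySem.List.len (PySem.Int.toChars number)) 2)) =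
         PySem.List.slice (PySem.Int.toChars number)
           (some (PySem.Int.floordiv (PySem.List.len (PySem.Int.toChars number)) 2)) none then
        invalid_ids ++ [number]
      else invalid_ids) []

-- ===== PORT B =====
-- the 'while x >= 10: x //= 10; digits += 1' loop of Source B (x ≥ 0 there, so carried as a Nat)
def pvDigitLoop (x : Nat) (digits : Nat) : Nat :=
  if h : 10 ≤ x then pvDigitLoop (x / 10) (digits + 1) else digits
  termination_by x
  decreasing_by exact Nat.div_lt_self (by omega) (by omega)

def get_invalid_ids_from_interval_alt (interval : List Int) : List Int :=
  interval.foldl (fun invalid_ids number =>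
    if number < 0 then invalid_ids
    else if pvDigitLoop number.toNat 1 % 2 ≠ 0 then invalid_ids
    else if PySem.Int.mod number ((10 : Int) ^ (pvDigitLoop number.toNat 1 / 2) + 1) = 0 then
      invalid_ids ++ [number]
    else invalid_ids) []

-- ===== PRECONDITION & SPEC =====
def Pre_get_invalid_ids_from_interval (interval : List Int) : Prop :=
  ∀ n ∈ interval, PySem.Int.bitLength n < 2 ^ 53
  -- A computes segment_length = int(number_length / 2) through CPython float division, which is exact
  -- only while number_length (the base-10 length of str(n)) stays below 2 ^ 53; the bit length of n
  -- bounds the decimal length, so this never binds on realistic input and excludes nothing A returns on.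
instance (interval : List Int) : Decidable (Pre_get_invalid_ids_from_interval interval) := by unfold Pre_get_invalid_ids_from_interval; infer_instance

def pvWitness_get_invalid_ids_from_interval : List Int := [1212, -33, 7, 470470, 11]

def Spec_get_invalid_ids_from_interval (interval : List Int) (out : List Int) : Prop := out = get_invalid_ids_from_interval_alt interval
instance (interval : List Int) (out : List Int) : Decidable (Spec_get_invalid_ids_from_interval interval out) := by unfold Spec_get_invalid_ids_from_interval; infer_instance

-- ===== CLAIM (what is proved, stated in full; the proofs are below) =====
def Claim_equal_get_invalid_ids_from_interval : Prop := ∀ (interval : List Int), Dom_get_invalid_ids_from_interval interval → Pre_get_invalid_ids_from_interval interval → Spec_get_invalid_ids_from_interval interval (get_invalid_ids_from_interval interval)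

-- ===== LEMMAS AND PROOFS =====

-- structural characterisation of Nat.toDigits 10 (behind PySem.Int.toChars)
def pvD (m : Nat) : List Char :=
  if h : m < 10 then [Nat.digitChar m] else pvD (m / 10) ++ [Nat.digitChar (m % 10)]
  termination_by m
  decreasing_by exact Nat.div_lt_self (by omega) (by omega)

lemma pv_core_append (f : Nat) : ∀ (n : Nat) (l : List Char),
    Nat.toDigitsCore 10 f n l = Nat.toDigitsCore 10 f n [] ++ l := by
  induction f with
  | zero => intro _ l; simp [Nat.toDigitsCore]
  | succ f ih =>
    intro n l
    simp only [Nat.toDigitsCore]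
    by_cases h : n / 10 = 0
    · simp [h]
    · simp only [h, if_false]
      rw [ih (n / 10) (Nat.digitChar (n % 10) :: l), ih (n / 10) [Nat.digitChar (n % 10)]]
      simp

lemma pv_core_eq_pvD : ∀ (f n : Nat), n < f → Nat.toDigitsCore 10 f n [] = pvD n := by
  intro f
  induction f with
  | zero => intro n h; omega
  | succ f ih =>
    intro n hn
    simp only [Nat.toDigitsCore]
    by_cases h : n / 10 = 0
    · have hlt : n < 10 := by omega
      rw [pvD, dif_pos hlt]
      simp [h, Nat.mod_eq_of_lt hlt]
    · have hge : ¬ n < 10 := by omega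
      simp only [h, if_false]
      rw [pv_core_append, ih (n / 10) (by omega)]
      conv_rhs => rw [pvD]
      rw [dif_neg hge]

lemma pv_toDigits_eq (m : Nat) : Nat.toDigits 10 m = pvD m := by
  unfold Nat.toDigits
  exact pv_core_eq_pvD (m + 1) m (by omega)

-- fixed-width (zero padded) low-k digits
def pvPad (k m : Nat) : List Char :=
  match k with
  | 0 => []
  | k + 1 => pvPad k (m / 10) ++ [Nat.digitChar (m % 10)]

lemma pvPad_length (k m : Nat) : (pvPad k m).length = k := by
  induction k generalizing m with
  | zero => rfl
  | succ k ih => simp [pvPad, ih]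

lemma pvD_eq_pad (m : Nat) : pvD m = pvPad (pvD m).length m := by
  induction m using Nat.strong_induction_on with
  | _ m ih =>
    by_cases h : m < 10
    · rw [pvD, dif_pos h]
      simp [pvPad, Nat.mod_eq_of_lt h]
    · rw [pvD, dif_neg h]
      have := ih (m / 10) (Nat.div_lt_self (by omega) (by omega))
      simp only [List.length_append, List.length_singleton]
      conv_lhs => rw [this]
      rfl

lemma pvD_lt_pow (m : Nat) : m < 10 ^ (pvD m).length := by
  induction m using Nat.strong_induction_on with
  | _ m ih =>
    by_cases h : m < 10
    · rw [pvD, dif_pos h]; simpa using h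
    · rw [pvD, dif_neg h]
      have h1 := ih (m / 10) (Nat.div_lt_self (by omega) (by omega))
      simp only [List.length_append, List.length_singleton]
      rw [pow_succ]
      have h2 : m % 10 < 10 := Nat.mod_lt _ (by omega)
      have h3 : 10 * (m / 10) + m % 10 = m := Nat.div_add_mod m 10
      nlinarith

lemma pvPad_split (j k m : Nat) : pvPad (j + k) m = pvPad j (m / 10 ^ k) ++ pvPad k m := by
  induction k generalizing m with
  | zero => simp [pvPad]
  | succ k ih =>
    have : j + (k + 1) = (j + k) + 1 := by omega
    rw [this]
    show pvPad (j + k) (m / 10) ++ [Nat.digitChar (m % 10)] = _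
    rw [ih (m / 10)]
    simp [pvPad, Nat.div_div_eq_div_mul, pow_succ, mul_comm]

lemma pv_digitChar_inj : ∀ a < 10, ∀ b < 10, Nat.digitChar a = Nat.digitChar b → a = b := by
  decide

lemma pvPad_eq_iff_mod (k : Nat) : ∀ a b : Nat, pvPad k a = pvPad k b ↔ a % 10 ^ k = b % 10 ^ k := by
  induction k with
  | zero => intro a b; simp [pvPad, Nat.mod_one]
  | succ k ih =>
    intro a b
    have hid : ∀ n : Nat, n % 10 ^ (k + 1) = 10 * (n / 10 % 10 ^ k) + n % 10 := by
      intro n; rw [pow_succ']; rw [Nat.mod_mul]; ring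
    constructor
    · intro h
      obtain ⟨h1, h2⟩ := List.append_singleton_inj.mp h
      have h3 := (ih _ _).mp h1
      have h4 := pv_digitChar_inj _ (Nat.mod_lt _ (by omega)) _ (Nat.mod_lt _ (by omega)) h2
      rw [hid a, hid b, h3, h4]
    · intro h
      rw [hid a, hid b] at h
      have ha : a % 10 < 10 := Nat.mod_lt _ (by omega)
      have hb : b % 10 < 10 := Nat.mod_lt _ (by omega)
      have h1 : a / 10 % 10 ^ k = b / 10 % 10 ^ k := by omega
      have h2 : a % 10 = b % 10 := by omega
      show pvPad k (a / 10) ++ _ = pvPad k (b / 10) ++ _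
      rw [(ih _ _).mpr h1, h2]

lemma pvD_no_dash (m : Nat) : '-' ∉ pvD m := by
  have hdc : ∀ d : Nat, d < 10 → Nat.digitChar d ≠ '-' := by decide
  induction m using Nat.strong_induction_on with
  | _ m ih =>
    by_cases h : m < 10
    · rw [pvD, dif_pos h]
      simpa using (hdc m h).symm
    · rw [pvD, dif_neg h]
      intro hmem
      rcases List.mem_append.mp hmem with h1 | h1
      · exact ih (m / 10) (Nat.div_lt_self (by omega) (by omega)) h1
      · simp at h1
        exact hdc (m % 10) (Nat.mod_lt _ (by omega)) h1.symm

lemma pvDigitLoop_eq (m : Nat) : ∀ d : Nat, pvDigitLoop m d + 1 = (pvD m).length + d := by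
  induction m using Nat.strong_induction_on with
  | _ m ih =>
    intro d
    by_cases h : 10 ≤ m
    · rw [pvDigitLoop, dif_pos h, pvD, dif_neg (by omega)]
      have := ih (m / 10) (Nat.div_lt_self (by omega) (by omega)) (d + 1)
      simp only [List.length_append, List.length_singleton]
      omega
    · rw [pvDigitLoop, dif_neg h, pvD, dif_pos (by omega)]
      simp [Nat.add_comm]

-- equal halves of a 2k-digit number ↔ divisibility by 10^k + 1
lemma pv_halves_iff_dvd (m k : Nat) (hm : m < 10 ^ (k + k)) :
    (m / 10 ^ k % 10 ^ k = m % 10 ^ k) ↔ (10 ^ k + 1) ∣ m := by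
  have hP : 0 < 10 ^ k := by positivity
  have hdm := Nat.div_add_mod m (10 ^ k)
  have hmod : m % 10 ^ k < 10 ^ k := Nat.mod_lt _ hP
  have hdiv : m / 10 ^ k < 10 ^ k := by
    apply (Nat.div_lt_iff_lt_mul hP).mpr
    calc m < 10 ^ (k + k) := hm
    _ = 10 ^ k * 10 ^ k := by rw [pow_add]
  rw [Nat.mod_eq_of_lt hdiv]
  constructor
  · intro h
    exact ⟨m % 10 ^ k, by nlinarith⟩
  · rintro ⟨q, hq⟩
    have hq' : q < 10 ^ k := by nlinarith
    have h1 : m = 10 ^ k * q + q := by rw [hq]; ring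
    have h2 : m / 10 ^ k = q := by
      rw [h1, Nat.mul_add_div hP, Nat.div_eq_of_lt hq']; omega
    have h3 : m % 10 ^ k = q := by
      rw [h1, Nat.mul_add_mod, Nat.mod_eq_of_lt hq']
    rw [h2, h3]

-- the per-element append condition of A ↔ that of B
lemma pv_cond_iff (n : Int) :
    (PySem.Int.mod (PySem.List.len (PySem.Int.toChars n)) 2 = 0 ∧
     PySem.List.slice (PySem.Int.toChars n) none
       (some (PySem.Int.floordiv (PySem.List.len (PySem.Int.toChars n)) 2)) =
     PySem.List.slice (PySem.Int.toChars n)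
       (some (PySem.Int.floordiv (PySem.List.len (PySem.Int.toChars n)) 2)) none) ↔
    (¬ n < 0 ∧ pvDigitLoop n.toNat 1 % 2 = 0 ∧
     PySem.Int.mod n ((10 : Int) ^ (pvDigitLoop n.toNat 1 / 2) + 1) = 0) := by
  by_cases hneg : n < 0
  · constructor
    · rintro ⟨h1, h2⟩
      exfalso
      have hchars : PySem.Int.toChars n = '-' :: pvD n.natAbs := by
        simp [PySem.Int.toChars, hneg, pv_toDigits_eq]
      rw [hchars] at h1 h2
      set L := pvD n.natAbs with hL
      have hlen1 : PySem.List.len ('-' :: L) = ((L.length + 1 : Nat) : Int) := by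
        simp [PySem.List.len_eq]
      rw [hlen1] at h1 h2
      have heven : (L.length + 1) % 2 = 0 := by
        rw [PySem.Int.mod_eq_emod_of_pos (by norm_num)] at h1
        omega
      have hfd : PySem.Int.floordiv ((L.length + 1 : Nat) : Int) 2 = (((L.length + 1) / 2 : Nat) : Int) := by
        exact_mod_cast PySem.Int.floordiv_natCast (L.length + 1) 2
      rw [hfd, PySem.List.slice_to_natCast, PySem.List.slice_from_natCast] at h2
      obtain ⟨j, hj⟩ : ∃ j, (L.length + 1) / 2 = j + 1 := ⟨(L.length + 1) / 2 - 1, by omega⟩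
      rw [hj] at h2
      simp only [List.take_succ_cons, List.drop_succ_cons] at h2
      have hmem : '-' ∈ List.drop j L := by rw [← h2]; exact List.mem_cons_self
      exact pvD_no_dash _ (List.mem_of_mem_drop hmem)
    · rintro ⟨h1, -⟩; exact absurd hneg h1
  · have hn : n = (n.toNat : Int) := (Int.toNat_of_nonneg (by omega)).symm
    set m := n.toNat with hm
    have hchars : PySem.Int.toChars n = pvD m := by
      rw [hm]; simp [PySem.Int.toChars, hneg, pv_toDigits_eq]
    have hloop : pvDigitLoop m 1 = (pvD m).length := by
      have := pvDigitLoop_eq m 1; omega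
    rw [hchars]
    set l := (pvD m).length with hldef
    have hlen1 : PySem.List.len (pvD m) = ((l : Nat) : Int) := by
      simp [PySem.List.len_eq, hldef]
    rw [hlen1]
    have hmod2 : (PySem.Int.mod ((l : Nat) : Int) 2 = 0) ↔ l % 2 = 0 := by
      rw [PySem.Int.mod_eq_emod_of_pos (by norm_num)]; omega
    by_cases heven : l % 2 = 0
    · have hfd : PySem.Int.floordiv ((l : Nat) : Int) 2 = ((l / 2 : Nat) : Int) := by
        exact_mod_cast PySem.Int.floordiv_natCast l 2
      rw [hfd, PySem.List.slice_to_natCast, PySem.List.slice_from_natCast]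
      set k := l / 2 with hk
      have hll : l = k + k := by omega
      have hsplit : pvD m = pvPad k (m / 10 ^ k) ++ pvPad k m := by
        conv_lhs => rw [pvD_eq_pad m]
        rw [← hldef, hll, pvPad_split]
      have htake : (pvD m).take k = pvPad k (m / 10 ^ k) := by
        rw [hsplit]; exact List.take_left' (pvPad_length _ _)
      have hdrop : (pvD m).drop k = pvPad k m := by
        rw [hsplit]; exact List.drop_left' (pvPad_length _ _)
      have hmlt : m < 10 ^ (k + k) := by rw [← hll, hldef]; exact pvD_lt_pow m
      have hcast : (10 : Int) ^ (pvDigitLoop m 1 / 2) + 1 = ((10 ^ k + 1 : Nat) : Int) := by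
        rw [hloop, ← hk]; push_cast; ring
      have hdvd : (PySem.Int.mod n ((10 : Int) ^ (pvDigitLoop m 1 / 2) + 1) = 0) ↔ (10 ^ k + 1) ∣ m := by
        rw [hcast, hn, PySem.Int.mod_eq_zero_iff_dvd, Int.natCast_dvd_natCast]
      constructor
      · rintro ⟨-, h2⟩
        refine ⟨hneg, by rw [hloop]; exact heven, hdvd.mpr ?_⟩
        rw [htake, hdrop] at h2
        exact (pv_halves_iff_dvd m k hmlt).mp ((pvPad_eq_iff_mod k _ _).mp h2)
      · rintro ⟨-, -, h3⟩
        refine ⟨hmod2.mpr heven, ?_⟩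
        rw [htake, hdrop]
        exact (pvPad_eq_iff_mod k _ _).mpr ((pv_halves_iff_dvd m k hmlt).mpr (hdvd.mp h3))
    · constructor
      · rintro ⟨h1, -⟩; exact absurd (hmod2.mp h1) heven
      · rintro ⟨-, h2, -⟩; rw [hloop] at h2; exact absurd h2 heven

-- ===== VERDICT (by name: the statement is the Claim_ definition above) =====
theorem get_invalid_ids_from_interval_spec : Claim_equal_get_invalid_ids_from_interval := by
  intro interval _ _
  unfold Spec_get_invalid_ids_from_interval get_invalid_ids_from_interval get_invalid_ids_from_interval_alt
  congr 1
  funext invalid_ids number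
  by_cases hc : (PySem.Int.mod (PySem.List.len (PySem.Int.toChars number)) 2 = 0 ∧
     PySem.List.slice (PySem.Int.toChars number) none
       (some (PySem.Int.floordiv (PySem.List.len (PySem.Int.toChars number)) 2)) =
     PySem.List.slice (PySem.Int.toChars number)
       (some (PySem.Int.floordiv (PySem.List.len (PySem.Int.toChars number)) 2)) none)
  · have hb := (pv_cond_iff number).mp hc
    rw [if_neg (by simpa using hc.1), if_pos hc.2, if_neg (by omega),
        if_neg (by simpa using hb.2.1), if_pos hb.2.2]
  · have hb : ¬ (¬ number < 0 ∧ pvDigitLoop number.toNat 1 % 2 = 0 ∧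
        PySem.Int.mod number ((10 : Int) ^ (pvDigitLoop number.toNat 1 / 2) + 1) = 0) :=
      fun h => hc ((pv_cond_iff number).mpr h)
    push_neg at hc hb
    by_cases h1 : PySem.Int.mod (PySem.List.len (PySem.Int.toChars number)) 2 = 0
    · rw [if_neg (by simpa using h1), if_neg (hc h1)]
      by_cases h2 : number < 0
      · rw [if_pos h2]
      · rw [if_neg h2]
        by_cases h3 : pvDigitLoop number.toNat 1 % 2 = 0
        · rw [if_neg (by simpa using h3), if_neg (hb (by omega) h3)]
        · rw [if_pos (by simpa using h3)]
    · rw [if_pos (by simpa using h1)]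
      by_cases h2 : number < 0
      · rw [if_pos h2]
      · rw [if_neg h2]
        by_cases h3 : pvDigitLoop number.toNat 1 % 2 = 0
        · rw [if_neg (by simpa using h3), if_neg (hb (by omega) h3)]
        · rw [if_pos (by simpa using h3)]
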